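-- pv_equiv track=rewrite | github.com/Benjamin-Loison/MathInFoLy19 | test_modification_clauses/writer2.py | at_most_black
-- ===== SOURCE A (Python) =====
-- def id_var(n, which, l_or_c, other):
-- 	if which == 0:
-- 		l,c = l_or_c, other # line format by default
-- 		return l*n + c + 1
-- 	if which == 1: #col format
-- 		l,c = other, l_or_c
-- 		return l*n + c + 1
--
-- def print_at_most_black(config, line_or_col, which):
-- 	s = ""
-- 	n=len(config)
-- 	result = ""
-- 	for i in range(n):
-- 		if config[i]:
-- 			s += '~'
-- 			s += "a"+str(id_var(n,which,  line_or_col, i))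
-- 			s+= ' | '
-- 	result += "( " + s[:-3] +" ) & "
-- 	return result
--
-- def at_most_black(line_or_col, which, config, varfalse, i, size):
-- 	if i >= size:
-- 		if varfalse == 0:
-- 			return print_at_most_black(config, line_or_col, which)
-- 		return ""
--
-- 	if varfalse == 0:
-- 		return print_at_most_black(config, line_or_col, which)
--
-- 	result = ""
-- 	for j_false in range(i+1, size):
-- 		config[j_false]=1
-- 		result += at_most_black(line_or_col, which, config, varfalse-1, j_false, size)
-- 		config[j_false]=0
-- 	return result
-- ===== SOURCE B (Python) =====
-- # B: flat enumeration of the position combinations (lexicographic), one clause per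
-- # combination, instead of A's nested recursive picker; equivalence is about the
-- # RETURN value only (both mutate config, with slightly different net effect).
-- def id_var(n, which, l_or_c, other):
-- 	if which == 0:
-- 		l,c = l_or_c, other
-- 		return l*n + c + 1
-- 	if which == 1:
-- 		l,c = other, l_or_c
-- 		return l*n + c + 1
--
-- def print_at_most_black(config, line_or_col, which):
-- 	s = ""
-- 	n = len(config)
-- 	result = ""
-- 	for i in range(n):
-- 		if config[i]:
-- 			s += '~'
-- 			s += "a" + str(id_var(n, which, line_or_col, i))
-- 			s += ' | '
-- 	result += "( " + s[:-3] + " ) & "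
-- 	return result
--
-- def _combos(k, xs):
-- 	# lexicographic k-combinations of xs (same order as itertools.combinations)
-- 	if k == 0:
-- 		return [[]]
-- 	if not xs:
-- 		return []
-- 	rest = xs[1:]
-- 	return [[xs[0]] + t for t in _combos(k - 1, rest)] + _combos(k, rest)
--
-- def at_most_black(line_or_col, which, config, varfalse, i, size):
-- 	if varfalse == 0:
-- 		return print_at_most_black(config, line_or_col, which)
-- 	if varfalse < 0:
-- 		return ""
-- 	parts = []
-- 	for combo in _combos(varfalse, list(range(i + 1, size))):
-- 		for p in combo:
-- 			config[p] = 1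
-- 		parts.append(print_at_most_black(config, line_or_col, which))
-- 		for p in combo:
-- 			config[p] = 0
-- 	return "".join(parts)
-- ===== Notes on version B (the rewrite author's own statement) =====
-- stated objective: alternative
-- what changed: A's nested recursive position picker (recursing on varfalse with the loop index as new start, mutating config around each recursive call) is replaced by a flat loop over the lexicographic varfalse-combinations of range(i+1, size), painting each combination, emitting one clause, and unpainting it; the mutual recursion disappears.
-- outside the precondition, e.g. on at_most_black(0, 0, [0], 2, 0, 5): A raises IndexError, B raises IndexError
import Mathlib
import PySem

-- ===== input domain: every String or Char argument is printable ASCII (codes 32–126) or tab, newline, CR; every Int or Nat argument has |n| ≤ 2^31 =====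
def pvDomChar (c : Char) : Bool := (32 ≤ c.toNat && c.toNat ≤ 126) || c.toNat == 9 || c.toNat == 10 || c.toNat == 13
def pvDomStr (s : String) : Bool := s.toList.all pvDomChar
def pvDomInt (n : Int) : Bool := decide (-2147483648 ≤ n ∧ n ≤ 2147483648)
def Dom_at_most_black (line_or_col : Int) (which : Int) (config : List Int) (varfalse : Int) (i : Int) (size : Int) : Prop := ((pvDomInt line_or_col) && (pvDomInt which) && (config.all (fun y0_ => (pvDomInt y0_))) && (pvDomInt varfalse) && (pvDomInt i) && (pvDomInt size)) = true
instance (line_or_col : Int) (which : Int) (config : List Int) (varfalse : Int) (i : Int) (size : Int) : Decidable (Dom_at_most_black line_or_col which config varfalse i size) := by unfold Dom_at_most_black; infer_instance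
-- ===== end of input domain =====

-- B replaces A's recursive position picker by a flat loop over the lexicographic
-- k-combinations of the candidate positions (objective: simpler, one clause per
-- combination). Both Pythons mutate `config` in place; the equivalence proved here
-- is about the RETURN value only.

-- ===== PORT A =====
-- helpers shared by both ports (same-module helpers of A, reused verbatim by B)
def idVar (n which l_or_c other : Int) : Option Int :=
  if which = 0 then some (l_or_c * n + other + 1)
  else if which = 1 then some (other * n + l_or_c + 1)
  else none   -- Python falls off the end: returns None

def strOfIdVar : Option Int → List Char
  | some v => PySem.Int.toChars v      -- str(id_var(...))
  | none => "None".toList              -- str(None)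

def printAMB (config : List Int) (line_or_col which : Int) : List Char :=
  let n : Int := PySem.List.len config
  let s : List Char := (PySem.List.pyRange 0 n).foldl
    (fun (s : List Char) (i : Int) =>
      if PySem.List.pyGetD config i 0 ≠ 0 then
        ((s ++ ['~']) ++ ("a".toList ++ strOfIdVar (idVar n which line_or_col i))) ++ " | ".toList
      else s) []
  "( ".toList ++ PySem.List.slice s none (some (-3)) ++ " ) & ".toList

-- the recursion of A, threading the mutated `config` (Python mutates it in place);
-- config[j]=v is PySem.List.pySetD (exact: Pre_ keeps every touched index in range)
mutual
def auxA (lc w size : Int) (config : List Int) (vf i : Int) : List Char × List Int :=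
  if size ≤ i then
    (if vf = 0 then (printAMB config lc w, config) else ([], config))
  else if vf = 0 then (printAMB config lc w, config)
  else loopA lc w size (vf - 1) config [] (i + 1)
termination_by (size - i).toNat * 2 + 1
decreasing_by omega

def loopA (lc w size vf1 : Int) (config : List Int) (acc : List Char) (j : Int) : List Char × List Int :=
  if h : j < size then
    let c1 := PySem.List.pySetD config j 1
    let p := auxA lc w size c1 vf1 j
    loopA lc w size vf1 (PySem.List.pySetD p.2 j 0) (acc ++ p.1) (j + 1)
  else (acc, config)
termination_by (size - j).toNat * 2 + 2
decreasing_by all_goals omega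
end

def at_most_black (line_or_col : Int) (which : Int) (config : List Int) (varfalse : Int) (i : Int) (size : Int) : String :=
  String.ofList (auxA line_or_col which size config varfalse i).1

-- ===== PORT B =====
-- lexicographic k-combinations (same order as itertools.combinations)
def combosB : Nat → List Int → List (List Int)
  | 0, _ => [[]]
  | _ + 1, [] => []
  | k + 1, x :: xs => ((combosB k xs).map (fun t => x :: t)) ++ combosB (k + 1) xs

-- `for p in combo: config[p] = v`
def setAll (cfg : List Int) (c : List Int) (v : Int) : List Int :=
  c.foldl (fun a p => PySem.List.pySetD a p v) cfg

-- one clause per combination: paint the combination, print, unpaint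
def goB (lc w : Int) (cs : List (List Int)) (st : List Char × List Int) : List Char × List Int :=
  cs.foldl (fun st c =>
    let c1 := setAll st.2 c 1
    (st.1 ++ printAMB c1 lc w, setAll c1 c 0)) st

def at_most_black_alt (line_or_col : Int) (which : Int) (config : List Int) (varfalse : Int) (i : Int) (size : Int) : String :=
  if varfalse = 0 then String.ofList (printAMB config line_or_col which)
  else if varfalse < 0 then ""
  else String.ofList
    (goB line_or_col which
      (combosB varfalse.toNat (PySem.List.pyRange (i + 1) size)) ([], config)).1

-- ===== PRECONDITION & SPEC =====
-- Pre_ excludes exactly the calls whose scanned position range i+1..size-1 leaves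
-- the list's natural index range: indices ≥ len(config) make A raise IndexError,
-- and negative indices reach tail cells through Python's negative-index wraparound,
-- where the aliasing of a painted cell with a tail cell makes both A's and B's
-- clause lists accidental artefacts of their reset schedules.
def Pre_at_most_black (line_or_col : Int) (which : Int) (config : List Int) (varfalse : Int) (i : Int) (size : Int) : Prop :=
  varfalse = 0 ∨ size ≤ i + 1 ∨ (0 ≤ i + 1 ∧ size ≤ (config.length : Int))
instance (line_or_col : Int) (which : Int) (config : List Int) (varfalse : Int) (i : Int) (size : Int) : Decidable (Pre_at_most_black line_or_col which config varfalse i size) := by unfold Pre_at_most_black; infer_instance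

def pvWitness_at_most_black : Int × Int × List Int × Int × Int × Int := (3, 1, [0, 1, 0, 0], 2, 0, 4)

def Spec_at_most_black (line_or_col : Int) (which : Int) (config : List Int) (varfalse : Int) (i : Int) (size : Int) (out : String) : Prop := out = at_most_black_alt line_or_col which config varfalse i size
instance (line_or_col : Int) (which : Int) (config : List Int) (varfalse : Int) (i : Int) (size : Int) (out : String) : Decidable (Spec_at_most_black line_or_col which config varfalse i size out) := by unfold Spec_at_most_black; infer_instance

-- ===== CLAIM (what is proved, stated in full; the proofs are below) =====
def Claim_equal_at_most_black : Prop := ∀ (line_or_col : Int) (which : Int) (config : List Int) (varfalse : Int) (i : Int) (size : Int), Dom_at_most_black line_or_col which config varfalse i size → Pre_at_most_black line_or_col which config varfalse i size → Spec_at_most_black line_or_col which config varfalse i size (at_most_black line_or_col which config varfalse i size)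

-- ===== LEMMAS AND PROOFS =====

lemma goB_nil (lc w : Int) (st : List Char × List Int) : goB lc w [] st = st := rfl

lemma goB_cons (lc w : Int) (c : List Int) (cs : List (List Int)) (st : List Char × List Int) :
    goB lc w (c :: cs) st =
      goB lc w cs (st.1 ++ printAMB (setAll st.2 c 1) lc w, setAll (setAll st.2 c 1) c 0) := rfl

lemma goB_append (lc w : Int) (l1 l2 : List (List Int)) (st : List Char × List Int) :
    goB lc w (l1 ++ l2) st = goB lc w l2 (goB lc w l1 st) := by
  unfold goB; exact List.foldl_append

lemma goB_acc (lc w : Int) (cs : List (List Int)) (acc : List Char) (cfg : List Int) :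
    goB lc w cs (acc, cfg) =
      (acc ++ (goB lc w cs ([], cfg)).1, (goB lc w cs ([], cfg)).2) := by
  induction cs generalizing acc cfg with
  | nil => simp [goB_nil]
  | cons c cs ih =>
    rw [goB_cons, goB_cons]
    simp only
    rw [ih, ih (acc := [] ++ printAMB (setAll cfg c 1) lc w)]
    simp

lemma setAll_singleton (cfg : List Int) (p v : Int) : setAll cfg [p] v = PySem.List.pySetD cfg p v := rfl

lemma setAll_cons (cfg : List Int) (p : Int) (c : List Int) (v : Int) :
    setAll cfg (p :: c) v = setAll (PySem.List.pySetD cfg p v) c v := rfl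

lemma getElem?_setAll (c : List Int) (cfg : List Int) (v : Int) (t : Nat)
    (h : ∀ p ∈ c, 0 ≤ p) :
    (setAll cfg c v)[t]? =
      if (t : Int) ∈ c then (if t < cfg.length then some v else none) else cfg[t]? := by
  induction c generalizing cfg with
  | nil => simp [setAll]
  | cons p c ih =>
    rw [setAll_cons, ih _ (fun q hq => h q (List.mem_cons_of_mem _ hq)),
        PySem.List.pySetD_of_nonneg _ _ (h p List.mem_cons_self)]
    have hp := h p List.mem_cons_self
    by_cases hmem : (t : Int) ∈ c
    · simp [hmem, List.length_set]
    · by_cases htp : (t : Int) = p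
      · have : p.toNat = t := by omega
        simp [hmem, htp, List.getElem?_set, this, List.length_set]
      · have : ¬ (p.toNat = t) := by omega
        simp [hmem, htp, List.getElem?_set, this, List.length_set]

lemma length_setAll (c cfg : List Int) (v : Int) : (setAll cfg c v).length = cfg.length := by
  induction c generalizing cfg with
  | nil => rfl
  | cons p c ih => rw [setAll_cons, ih, PySem.List.length_pySetD]

lemma pySetD_pySetD_same (cfg : List Int) (j a b : Int) (hj : 0 ≤ j) :
    PySem.List.pySetD (PySem.List.pySetD cfg j a) j b = PySem.List.pySetD cfg j b := by
  rw [PySem.List.pySetD_of_nonneg _ _ hj, PySem.List.pySetD_of_nonneg _ _ hj,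
      PySem.List.pySetD_of_nonneg _ _ hj, List.set_set]

lemma pySetD_setAll_comm (c cfg : List Int) (j u v : Int) (hj : 0 ≤ j)
    (hc : ∀ p ∈ c, 0 ≤ p ∧ p ≠ j) :
    PySem.List.pySetD (setAll cfg c v) j u = setAll (PySem.List.pySetD cfg j u) c v := by
  apply List.ext_getElem?
  intro t
  rw [PySem.List.pySetD_of_nonneg _ _ hj, List.getElem?_set,
      getElem?_setAll _ _ _ _ (fun p hp => (hc p hp).1),
      getElem?_setAll _ _ _ _ (fun p hp => (hc p hp).1),
      PySem.List.pySetD_of_nonneg _ _ hj, List.getElem?_set, length_setAll, List.length_set]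
  by_cases hmem : (t : Int) ∈ c
  · have : ¬ (j.toNat = t) := by
      have := (hc _ hmem); omega
    simp [hmem, this]
  · simp [hmem]

lemma setAll_idem (c cfg : List Int) (v : Int) (h : ∀ p ∈ c, 0 ≤ p) :
    setAll (setAll cfg c v) c v = setAll cfg c v := by
  apply List.ext_getElem?
  intro t
  rw [getElem?_setAll _ _ _ _ h, getElem?_setAll _ _ _ _ h, length_setAll]
  by_cases hmem : (t : Int) ∈ c <;> simp [hmem]



lemma mem_of_mem_combosB : ∀ (k : Nat) (l c : List Int), c ∈ combosB k l → ∀ p ∈ c, p ∈ l := by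
  intro k l
  induction l generalizing k with
  | nil =>
    intro c hc p hp
    match k with
    | 0 => simp [combosB] at hc; simp [hc] at hp
    | k + 1 => simp [combosB] at hc
  | cons x xs ih =>
    intro c hc p hp
    match k with
    | 0 => simp [combosB] at hc; simp [hc] at hp
    | k + 1 =>
      simp only [combosB, List.mem_append, List.mem_map] at hc
      rcases hc with ⟨t, ht, rfl⟩ | hc
      · rcases List.mem_cons.1 hp with rfl | hp
        · exact List.mem_cons_self
        · exact List.mem_cons_of_mem _ (ih k t ht p hp)
      · exact List.mem_cons_of_mem _ (ih (k + 1) c hc p hp)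

lemma combosB_nil_of_lt : ∀ (k : Nat) (l : List Int), l.length < k → combosB k l = [] := by
  intro k l
  induction l generalizing k with
  | nil =>
    intro h
    match k with
    | 0 => omega
    | k + 1 => rfl
  | cons x xs ih =>
    intro h
    match k with
    | 0 => omega
    | k + 1 =>
      simp only [List.length_cons] at h
      simp only [combosB, ih k (by omega), ih (k + 1) (by omega), List.map_nil, List.append_nil]

lemma combosB_ne_nil : ∀ (k : Nat) (l : List Int), k ≤ l.length → combosB k l ≠ [] := by
  intro k l
  induction l generalizing k with
  | nil =>
    intro h
    match k with
    | 0 => simp [combosB]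
    | k + 1 => simp at h
  | cons x xs ih =>
    intro h
    match k with
    | 0 => simp [combosB]
    | k + 1 =>
      simp only [combosB]
      intro hcontra
      rcases List.append_eq_nil_iff.1 hcontra with ⟨h1, _⟩
      exact ih k (by simpa using h) (List.map_eq_nil_iff.1 h1)

lemma goB_map_cons (lc w j : Int) (hj : 0 ≤ j) :
    ∀ (C : List (List Int)), (∀ c ∈ C, ∀ p ∈ c, 0 ≤ p ∧ p ≠ j) →
    ∀ (acc : List Char) (b : List Int),
    goB lc w (C.map (fun t => j :: t)) (acc, b) =
      (acc ++ (goB lc w C ([], PySem.List.pySetD b j 1)).1,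
       if C.isEmpty then b
       else PySem.List.pySetD (goB lc w C ([], PySem.List.pySetD b j 1)).2 j 0) := by
  intro C
  induction C with
  | nil => intro _ acc b; simp [goB_nil]
  | cons c C' ih =>
    intro hc acc b
    have hch : ∀ p ∈ c, 0 ≤ p ∧ p ≠ j := hc c List.mem_cons_self
    have hct : ∀ c' ∈ C', ∀ p ∈ c', 0 ≤ p ∧ p ≠ j := fun c' h' => hc c' (List.mem_cons_of_mem _ h')
    set a0 := PySem.List.pySetD b j 1 with ha0
    set c1 := setAll a0 c 1 with hc1
    have e_c1B : setAll b (j :: c) 1 = c1 := by rw [setAll_cons]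
    have e_fix : PySem.List.pySetD c1 j 1 = c1 := by
      rw [hc1, pySetD_setAll_comm _ _ _ _ _ hj hch, ha0, pySetD_pySetD_same _ _ _ _ hj]
    set a1 := setAll c1 c 0 with ha1
    have e_b' : setAll c1 (j :: c) 0 = PySem.List.pySetD a1 j 0 := by
      rw [setAll_cons]; exact (pySetD_setAll_comm c c1 j 0 0 hj hch).symm
    have e_b'1 : PySem.List.pySetD (PySem.List.pySetD a1 j 0) j 1 = a1 := by
      rw [pySetD_pySetD_same _ _ _ _ hj, ha1, pySetD_setAll_comm _ _ _ _ _ hj hch, e_fix]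
    
    rw [List.map_cons, goB_cons]
    simp only [e_c1B, e_b']
    rw [ih hct, e_b'1]
    rw [goB_cons lc w c C' ([], a0)]
    simp only [← hc1, List.nil_append, ← ha1]
    rw [goB_acc lc w C' (printAMB c1 lc w) a1]
    cases C' with
    | nil => simp [goB_nil]
    | cons d D => simp [List.isEmpty_cons, List.append_assoc]

lemma loopA_neg : ∀ (n : Nat) (lc w size vf1 : Int) (cfg : List Int) (acc : List Char) (j : Int),
    (size - j).toNat = n → vf1 < 0 → (loopA lc w size vf1 cfg acc j).1 = acc := by
  intro n
  induction n using Nat.strong_induction_on with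
  | _ n ih =>
    intro lc w size vf1 cfg acc j hn hv
    rw [loopA]
    by_cases h : j < size
    · simp only [h, dif_pos]
      have hinner : (auxA lc w size (PySem.List.pySetD cfg j 1) vf1 j).1 = [] := by
        rw [auxA]
        have h2 : ¬ size ≤ j := by omega
        have h3 : ¬ vf1 = 0 := by omega
        simp only [h2, if_false, h3]
        exact ih ((size - (j+1)).toNat) (by omega) lc w size (vf1 - 1) _ [] (j+1) rfl (by omega)
      rw [ih ((size - (j+1)).toNat) (by omega) lc w size vf1 _ _ (j+1) rfl hv, hinner,
          List.append_nil]
    · simp [h]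

lemma loopA_main : ∀ (n : Nat) (lc w size vf1 : Int) (cfg : List Int) (acc : List Char) (j : Int),
    (size - j).toNat = n → 0 ≤ j → 0 ≤ vf1 →
    ((loopA lc w size vf1 cfg acc j).2 = setAll cfg (PySem.List.pyRange j size) 0) ∧
    (if vf1 + 1 ≤ size - j then
        loopA lc w size vf1 cfg acc j =
          goB lc w (combosB (vf1 + 1).toNat (PySem.List.pyRange j size)) (acc, cfg)
      else (loopA lc w size vf1 cfg acc j).1 = acc ∧
        combosB (vf1 + 1).toNat (PySem.List.pyRange j size) = []) := by
  intro n
  induction n using Nat.strong_induction_on with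
  | _ n ih =>
    intro lc w size vf1 cfg acc j hn hj hv
    by_cases h : j < size
    · -- j < size
      have hR : PySem.List.pyRange j size = j :: PySem.List.pyRange (j + 1) size :=
        PySem.List.pyRange_one_cons h
      have hrest : ∀ p ∈ PySem.List.pyRange (j + 1) size, 0 ≤ p ∧ p ≠ j := by
        intro p hp
        rw [PySem.List.mem_pyRange_one] at hp
        constructor <;> omega
      have hcomb : ∀ k : Nat, ∀ c ∈ combosB k (PySem.List.pyRange (j + 1) size), ∀ p ∈ c, 0 ≤ p ∧ p ≠ j :=
        fun k c hc p hp => hrest p (mem_of_mem_combosB k _ c hc p hp)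
      have hlenrest : (PySem.List.pyRange (j + 1) size).length = (size - (j + 1)).toNat :=
        PySem.List.length_pyRange_one _ _
      rw [loopA]
      simp only [h, dif_pos]
      by_cases hv0 : vf1 = 0
      · -- leaf case: the inner call prints
        subst hv0
        have hp : auxA lc w size (PySem.List.pySetD cfg j 1) 0 j =
            (printAMB (PySem.List.pySetD cfg j 1) lc w, PySem.List.pySetD cfg j 1) := by
          rw [auxA]; simp
        rw [hp]
        simp only
        rw [pySetD_pySetD_same _ _ _ _ hj]
        have IH := ih ((size - (j + 1)).toNat) (by omega) lc w size 0
          (PySem.List.pySetD cfg j 0)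
          (acc ++ printAMB (PySem.List.pySetD cfg j 1) lc w) (j + 1) rfl (by omega) le_rfl
        constructor
        · rw [IH.1, hR, setAll_cons]
        · have hcond : (0 : Int) + 1 ≤ size - j := by omega
          simp only [hcond, if_pos]
          have hB : combosB ((0 : Int) + 1).toNat (PySem.List.pyRange j size) =
              [[j]] ++ combosB 1 (PySem.List.pyRange (j + 1) size) := by
            rw [show ((0 : Int) + 1).toNat = 1 from by omega, hR]; simp [combosB]
          rw [hB, goB_append, goB_cons, goB_nil]
          simp only [setAll_singleton]
          rw [pySetD_pySetD_same _ _ _ _ hj]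
          by_cases h2 : j + 1 < size
          · have := IH.2
            simp only [show (0:Int) + 1 ≤ size - (j+1) from by omega, if_pos] at this
            exact this
          · have hR2 : PySem.List.pyRange (j + 1) size = [] :=
              PySem.List.pyRange_one_eq_nil (by omega)
            rw [loopA]
            simp only [h2, dif_neg, not_false_iff, hR2]
            rfl
      · -- inner recursive case: vf1 ≥ 1
        have hv1 : 1 ≤ vf1 := by omega
        have hp : auxA lc w size (PySem.List.pySetD cfg j 1) vf1 j =
            loopA lc w size (vf1 - 1) (PySem.List.pySetD cfg j 1) [] (j + 1) := by
          rw [auxA]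
          have h2 : ¬ size ≤ j := by omega
          simp [h2, hv0]
        rw [hp]
        set p := loopA lc w size (vf1 - 1) (PySem.List.pySetD cfg j 1) [] (j + 1) with hpdef
        have I := ih ((size - (j + 1)).toNat) (by omega) lc w size (vf1 - 1)
          (PySem.List.pySetD cfg j 1) [] (j + 1) rfl (by omega) (by omega)
        have I1 : p.2 = setAll (PySem.List.pySetD cfg j 1) (PySem.List.pyRange (j + 1) size) 0 := I.1
        have hcfg'' : PySem.List.pySetD p.2 j 0 =
            setAll (PySem.List.pySetD cfg j 0) (PySem.List.pyRange (j + 1) size) 0 := by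
          rw [I1, pySetD_setAll_comm _ _ _ _ _ hj hrest, pySetD_pySetD_same _ _ _ _ hj]
        have N := ih ((size - (j + 1)).toNat) (by omega) lc w size vf1
          (PySem.List.pySetD p.2 j 0) (acc ++ p.1) (j + 1) rfl (by omega) hv
        constructor
        · rw [N.1, hcfg'', setAll_idem _ _ _ (fun q hq => (hrest q hq).1), hR, setAll_cons]
        · have htn : (vf1 + 1).toNat = vf1.toNat + 1 := by omega
          by_cases hfru : vf1 + 1 ≤ size - j
          · simp only [hfru, if_pos]
            -- inner call is fruitful
            have I2 : p = goB lc w (combosB ((vf1 - 1) + 1).toNat (PySem.List.pyRange (j + 1) size))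
                ([], PySem.List.pySetD cfg j 1) := by
              have := I.2
              simp only [show (vf1 - 1) + 1 ≤ size - (j + 1) from by omega, if_pos] at this
              exact this
            have htn2 : ((vf1 - 1) + 1).toNat = vf1.toNat := by omega
            rw [htn2] at I2
            have hB : combosB (vf1 + 1).toNat (PySem.List.pyRange j size) =
                ((combosB vf1.toNat (PySem.List.pyRange (j + 1) size)).map (fun t => j :: t)) ++
                  combosB (vf1.toNat + 1) (PySem.List.pyRange (j + 1) size) := by
              rw [htn, hR]; rfl
            rw [hB, goB_append]
            rw [goB_map_cons lc w j hj _ (hcomb vf1.toNat) acc cfg]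
            have hne : combosB vf1.toNat (PySem.List.pyRange (j + 1) size) ≠ [] :=
              combosB_ne_nil _ _ (by rw [hlenrest]; omega)
            rw [if_neg (by simpa [List.isEmpty_iff] using hne)]
            rw [← I2]
            by_cases hfru2 : vf1 + 1 ≤ size - (j + 1)
            · have := N.2
              simp only [hfru2, if_pos, htn] at this
              exact this
            · have hnil : combosB (vf1.toNat + 1) (PySem.List.pyRange (j + 1) size) = [] :=
                combosB_nil_of_lt _ _ (by rw [hlenrest]; omega)
              rw [hnil, goB_nil]
              have hN2 := N.2
              simp only [hfru2, if_neg, not_false_iff] at hN2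
              have hstate : (loopA lc w size vf1 (PySem.List.pySetD p.2 j 0) (acc ++ p.1) (j + 1)).2 =
                  PySem.List.pySetD p.2 j 0 := by
                rw [N.1, hcfg'', setAll_idem _ _ _ (fun q hq => (hrest q hq).1), ← hcfg'']
              exact Prod.ext hN2.1 hstate
          · simp only [hfru, if_neg, not_false_iff]
            have hdeg : ¬ ((vf1 - 1) + 1 ≤ size - (j + 1)) := by omega
            have I2 := I.2
            simp only [hdeg, if_neg, not_false_iff] at I2
            have hp1 : p.1 = [] := I2.1
            constructor
            · have hN2 := N.2
              simp only [show ¬ (vf1 + 1 ≤ size - (j + 1)) from by omega, if_neg, not_false_iff] at hN2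
              rw [hN2.1, hp1, List.append_nil]
            · rw [htn, hR]
              show ((combosB vf1.toNat (PySem.List.pyRange (j + 1) size)).map (fun t => j :: t)) ++
                  combosB (vf1.toNat + 1) (PySem.List.pyRange (j + 1) size) = []
              rw [combosB_nil_of_lt vf1.toNat _ (by rw [hlenrest]; omega),
                  combosB_nil_of_lt (vf1.toNat + 1) _ (by rw [hlenrest]; omega)]
              rfl
    · -- j ≥ size: empty range
      have hR : PySem.List.pyRange j size = [] := PySem.List.pyRange_one_eq_nil (by omega)
      rw [loopA]
      simp only [h, dif_neg, not_false_iff]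
      refine ⟨by rw [hR]; rfl, ?_⟩
      rw [if_neg (by omega)]
      refine ⟨by trivial, ?_⟩
      obtain ⟨k, hk⟩ : ∃ k, (vf1 + 1).toNat = k + 1 := ⟨(vf1 + 1).toNat - 1, by omega⟩
      rw [hk, hR]
      rfl


-- ===== VERDICT (by name: the statement is the Claim_ definition above) =====
theorem at_most_black_spec : Claim_equal_at_most_black := by
  intro lc w cfg vf i size _hDom hPre
  unfold Spec_at_most_black at_most_black at_most_black_alt
  by_cases hv0 : vf = 0
  · subst hv0
    rw [auxA, if_pos rfl]
    by_cases hsz : size ≤ i <;> simp [hsz]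
  · rw [if_neg hv0]
    by_cases hvneg : vf < 0
    · rw [if_pos hvneg, auxA]
      by_cases hsz : size ≤ i
      · simp [hsz, hv0]
      · simp only [hsz, if_neg, not_false_iff, hv0]
        rw [loopA_neg ((size - (i + 1)).toNat) lc w size (vf - 1) cfg [] (i + 1) rfl (by omega)]
    · -- vf ≥ 1
      rw [if_neg hvneg]
      have hv1 : 1 ≤ vf := by omega
      obtain ⟨k, hk⟩ : ∃ k, vf.toNat = k + 1 := ⟨vf.toNat - 1, by omega⟩
      rw [auxA]
      by_cases hsz : size ≤ i
      · have hR : PySem.List.pyRange (i + 1) size = [] :=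
          PySem.List.pyRange_one_eq_nil (by omega)
        rw [hR, hk]
        simp [hsz, hv0, goB_nil, combosB]
      · simp only [hsz, if_neg, not_false_iff, hv0]
        by_cases hsz2 : size ≤ i + 1
        · have hR : PySem.List.pyRange (i + 1) size = [] :=
            PySem.List.pyRange_one_eq_nil (by omega)
          rw [hR, hk, loopA]
          simp only [show ¬ (i + 1 < size) from by omega, dif_neg, not_false_iff]
          simp [goB_nil, combosB]
        · have hbounds : 0 ≤ i + 1 ∧ size ≤ (cfg.length : Int) := by
            rcases hPre with h1 | h1 | h1
            · exact absurd h1 hv0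
            · exact absurd h1 hsz2
            · exact h1
          have M := (loopA_main ((size - (i + 1)).toNat) lc w size (vf - 1) cfg [] (i + 1)
            rfl (by omega) (by omega)).2
          rw [show vf - 1 + 1 = vf from by omega] at M
          by_cases hfru : vf ≤ size - (i + 1)
          · rw [if_pos hfru] at M
            rw [M]
          · rw [if_neg hfru] at M
            rw [M.1, M.2, goB_nil]
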